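-- pv_equiv track=rewrite | github.com/uswakk/multimodal-rag | services/generation_service/prompt_builder.py | _is_visual_query
-- ===== SOURCE A (Python) =====
-- def _is_visual_query(query: str) -> bool:
--     visual_keywords = [
--         "color", "colour", "look", "image", "picture", "photo",
--         "show", "visible", "wearing", "dressed", "appearance",
--         "shape", "diagram", "chart", "graph", "figure", "illustration"
--     ]
--     q = query.lower()
--     return any(kw in q for kw in visual_keywords)
-- ===== SOURCE B (Python) =====
-- def _is_visual_query(query: str) -> bool:
--     visual_keywords = [
--         "color", "colour", "look", "image", "picture", "photo",
--         "show", "visible", "wearing", "dressed", "appearance",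
--         "shape", "diagram", "chart", "graph", "figure", "illustration"
--     ]
--     q = query.lower()
--     for i in range(len(q)):
--         for kw in visual_keywords:
--             if q.startswith(kw, i):
--                 return True
--     return False
-- ===== Notes on version B (the rewrite author's own statement) =====
-- stated objective: alternative
-- what changed: Replaces the keyword-major sequence of independent substring membership scans by one position-major left-to-right pass over the lowered query that checks at each position whether any keyword starts there and returns at the first match.
import Mathlib
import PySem

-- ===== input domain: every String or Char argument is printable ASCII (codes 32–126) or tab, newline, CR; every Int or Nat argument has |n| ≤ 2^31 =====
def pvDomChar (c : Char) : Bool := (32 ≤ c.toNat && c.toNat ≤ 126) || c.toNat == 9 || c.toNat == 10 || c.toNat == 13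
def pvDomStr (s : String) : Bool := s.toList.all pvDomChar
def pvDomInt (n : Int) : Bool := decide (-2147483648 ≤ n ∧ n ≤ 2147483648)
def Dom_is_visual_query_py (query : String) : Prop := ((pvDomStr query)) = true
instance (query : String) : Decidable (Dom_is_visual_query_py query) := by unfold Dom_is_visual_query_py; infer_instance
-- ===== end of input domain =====

-- B replaces the keyword-major any(kw in q) substring scans by one position-major
-- left-to-right pass checking at each position whether any keyword starts there (alternative).

-- ===== PORT A =====
def is_visual_query_py (query : String) : Bool :=
  let visual_keywords : List String :=
    ["color", "colour", "look", "image", "picture", "photo",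
     "show", "visible", "wearing", "dressed", "appearance",
     "shape", "diagram", "chart", "graph", "figure", "illustration"]
  let q := PySem.Str.lower query
  visual_keywords.any (fun kw => PySem.Str.isIn kw q)

-- ===== PORT B =====
-- for i in range(len(q)): for kw in keywords: if q.startswith(kw, i): return True
def pvScan (kws : List String) : List Char → Bool
  | [] => false
  | c :: t => kws.any (fun kw => PySem.Chars.startswith (c :: t) kw.toList) || pvScan kws t

def is_visual_query_py_alt (query : String) : Bool :=
  let visual_keywords : List String :=
    ["color", "colour", "look", "image", "picture", "photo",
     "show", "visible", "wearing", "dressed", "appearance",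
     "shape", "diagram", "chart", "graph", "figure", "illustration"]
  pvScan visual_keywords (PySem.Str.lower query).toList

-- ===== PRECONDITION & SPEC =====
def Spec_is_visual_query_py (query : String) (out : Bool) : Prop := out = is_visual_query_py_alt query
instance (query : String) (out : Bool) : Decidable (Spec_is_visual_query_py query out) := by unfold Spec_is_visual_query_py; infer_instance

-- ===== CLAIM (what is proved, stated in full; the proofs are below) =====
def Claim_equal_is_visual_query_py : Prop := ∀ (query : String), Dom_is_visual_query_py query → Spec_is_visual_query_py query (is_visual_query_py query)

-- ===== LEMMAS AND PROOFS =====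
theorem pvScan_eq_any_isIn (kws : List String) (h : ∀ kw ∈ kws, kw.toList ≠ []) :
    ∀ l : List Char, pvScan kws l = kws.any (fun kw => PySem.Chars.isIn kw.toList l) := by
  intro l
  induction l with
  | nil =>
    rw [pvScan]
    symm
    rw [List.any_eq_false]
    intro kw hkw
    rw [Bool.not_eq_true, PySem.Chars.isIn_eq_false_iff, List.infix_nil]
    exact h kw hkw
  | cons c t ih =>
    rw [pvScan, ih, Bool.eq_iff_iff]
    simp only [Bool.or_eq_true, List.any_eq_true, PySem.Chars.isIn_iff_infix,
      PySem.Chars.startswith_iff, List.infix_cons_iff]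
    constructor
    · rintro (⟨x, hx, hp⟩ | ⟨x, hx, hp⟩)
      · exact ⟨x, hx, Or.inl hp⟩
      · exact ⟨x, hx, Or.inr hp⟩
    · rintro ⟨x, hx, hp | hp⟩
      · exact Or.inl ⟨x, hx, hp⟩
      · exact Or.inr ⟨x, hx, hp⟩

-- ===== VERDICT (by name: the statement is the Claim_ definition above) =====
theorem is_visual_query_py_spec : Claim_equal_is_visual_query_py := by
  intro query _
  unfold Spec_is_visual_query_py is_visual_query_py is_visual_query_py_alt
  rw [pvScan_eq_any_isIn _ (by decide)]
  simp [PySem.Str.isIn_eq]
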